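-- pv_equiv track=rewrite | github.com/BhawickJain/katas.py | katas/count_occurrences.py | count_occurrences_advanced
-- ===== SOURCE A (Python) =====
-- def count_occurrences_advanced(text: str, ignore_chars: str, sort_count=False) -> list:
--     """Returns an orders list of tuples consisting of ("char", count)
--
--     args:
--         text -- string input to be counted
--         ignore_chars -- string list of forbidden characters
--         sorted_count -- (optional) if True, sorts the count in ascending order, False by default
--     """
--     count_dict: dict = {}
--     for char in text:
--         if char in ignore_chars:
--             continue
--         if char in count_dict:
--             count_dict[char] += 1
--         else:
--             count_dict[char] = 1
--     count_list = list(count_dict.items())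
--     if sort_count:
--         count_list = sorted(count_list, key=lambda it: it[1])  # sort by count value
--     return count_list
-- ===== SOURCE B (Python) =====
-- def count_occurrences_advanced(text: str, ignore_chars: str, sort_count=False) -> list:
--     """Distinct-keys pass, then a per-char counting rescan; same output as A."""
--     distinct = []
--     for char in text:
--         if char not in ignore_chars and char not in distinct:
--             distinct.append(char)
--     count_list = [(char, sum(1 for c in text if c == char)) for char in distinct]
--     if sort_count:
--         count_list = sorted(count_list, key=lambda it: it[1])
--     return count_list
-- ===== Notes on version B (the rewrite author's own statement) =====
-- stated objective: alternative
-- what changed: Replaces the single running-dict accumulation with two passes: collect distinct non-ignored chars in first-appearance order, then rescan the text once per distinct char to count it; same optional stable sort by count.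
import Mathlib
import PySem

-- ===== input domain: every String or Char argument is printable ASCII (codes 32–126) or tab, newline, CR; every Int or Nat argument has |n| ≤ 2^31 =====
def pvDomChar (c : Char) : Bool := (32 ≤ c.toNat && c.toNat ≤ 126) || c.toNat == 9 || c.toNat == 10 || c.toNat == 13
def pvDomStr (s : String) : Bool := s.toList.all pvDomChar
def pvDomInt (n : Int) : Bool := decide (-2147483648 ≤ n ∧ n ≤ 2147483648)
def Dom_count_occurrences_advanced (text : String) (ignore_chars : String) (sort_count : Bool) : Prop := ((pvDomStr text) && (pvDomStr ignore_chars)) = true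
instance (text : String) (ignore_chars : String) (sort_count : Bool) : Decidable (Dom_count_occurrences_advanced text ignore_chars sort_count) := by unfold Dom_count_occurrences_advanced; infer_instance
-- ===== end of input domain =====

-- B collects the distinct non-ignored characters in first-appearance order, then counts each by
-- rescanning the text, instead of A's single running-dict accumulation (objective: alternative).

-- ===== PORT A =====
def count_occurrences_advanced (text : String) (ignore_chars : String) (sort_count : Bool) : List (String × Int) :=
  let count_dict : PySem.Dict String Int :=
    text.toList.foldl (fun d c =>
      if PySem.Str.isIn c.toString ignore_chars then d
      else if d.contains c.toString then d.insert c.toString (d.getD c.toString 0 + 1)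
      else d.insert c.toString 1) PySem.Dict.empty
  let count_list := count_dict.items
  if sort_count then PySem.List.sorted count_list (fun it => it.2) else count_list

-- ===== PORT B =====
def count_occurrences_advanced_alt (text : String) (ignore_chars : String) (sort_count : Bool) : List (String × Int) :=
  let distinct : List String :=
    text.toList.foldl (fun acc c =>
      if !(PySem.Str.isIn c.toString ignore_chars) && !(acc.contains c.toString)
      then acc ++ [c.toString] else acc) []
  let count_list := distinct.map (fun ch =>
    (ch, text.toList.foldl (fun n c => if c.toString == ch then n + 1 else n) (0 : Int)))
  if sort_count then PySem.List.sorted count_list (fun it => it.2) else count_list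

-- ===== PRECONDITION & SPEC =====
def Spec_count_occurrences_advanced (text : String) (ignore_chars : String) (sort_count : Bool) (out : List (String × Int)) : Prop := out = count_occurrences_advanced_alt text ignore_chars sort_count
instance (text : String) (ignore_chars : String) (sort_count : Bool) (out : List (String × Int)) : Decidable (Spec_count_occurrences_advanced text ignore_chars sort_count out) := by unfold Spec_count_occurrences_advanced; infer_instance

-- ===== CLAIM (what is proved, stated in full; the proofs are below) =====
def Claim_equal_count_occurrences_advanced : Prop := ∀ (text : String) (ignore_chars : String) (sort_count : Bool), Dom_count_occurrences_advanced text ignore_chars sort_count → Spec_count_occurrences_advanced text ignore_chars sort_count (count_occurrences_advanced text ignore_chars sort_count)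

-- ===== LEMMAS AND PROOFS =====

theorem count_filter_of_pos {α : Type} [BEq α] [LawfulBEq α] (p : α → Bool) (c : α)
    (h : p c = true) (l : List α) : List.count c (l.filter p) = List.count c l := by
  induction l with
  | nil => rfl
  | cons d t ih =>
    rw [List.filter_cons]
    by_cases hd : p d = true
    · rw [if_pos hd, List.count_cons, List.count_cons, ih]
    · rw [if_neg hd, List.count_cons, if_neg (fun hb : (d == c) = true => hd (eq_of_beq hb ▸ h)),
        ih, Nat.add_zero]

-- The chars of `text` that survive the ignore filter, as one-char strings.
def pvKeep (text ignore_chars : String) : List String :=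
  ((text.toList).filter (fun c => !(PySem.Str.isIn c.toString ignore_chars))).map Char.toString

-- A's dict is Counter(pvKeep …)
theorem pv_dict_eq (text ignore_chars : String) :
    text.toList.foldl (fun d c =>
      if PySem.Str.isIn c.toString ignore_chars then d
      else if d.contains c.toString then d.insert c.toString (d.getD c.toString 0 + 1)
      else d.insert c.toString 1) PySem.Dict.empty
    = PySem.Dict.counter (pvKeep text ignore_chars) := by
  rw [← PySem.Dict.foldl_insert_getD_add_one_eq_counter, pvKeep, List.foldl_map,
      List.foldl_filter]
  apply PySem.List.foldl_congr_mem
  intro d c _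
  by_cases hq : PySem.Str.isIn c.toString ignore_chars = true
  · rw [if_pos hq, if_neg (by simpa using hq)]
  · rw [if_neg hq]
    rw [if_pos (show (!PySem.Str.isIn c.toString ignore_chars) = true by
      rw [eq_false_of_ne_true hq]; rfl)]
    by_cases hc : d.contains c.toString = true
    · rw [if_pos hc]
    · rw [if_neg hc, PySem.Dict.getD_of_not_contains, zero_add]
      exact eq_false_of_ne_true hc

-- B's distinct list is set(pvKeep …) (first occurrences, in order)
theorem pv_distinct_eq (text ignore_chars : String) :
    text.toList.foldl (fun acc c =>
      if !(PySem.Str.isIn c.toString ignore_chars) && !(acc.contains c.toString)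
      then acc ++ [c.toString] else acc) []
    = PySem.Set.ofList (pvKeep text ignore_chars) := by
  rw [PySem.Set.ofList_eq_foldl, pvKeep, List.foldl_map, List.foldl_filter]
  apply PySem.List.foldl_congr_mem
  intro acc c _
  by_cases hq : PySem.Chars.isIn [c] ignore_chars.toList
  · simp [hq]
  · by_cases hc : String.singleton c ∈ acc <;>
      simp [hq, hc, PySem.Set.add]

-- counting by rescanning the whole text agrees with counting in the filtered list,
-- for any char that survives the filter
set_option maxHeartbeats 1000000 in
theorem pv_count_eq (text ignore_chars : String) (ch : String)
    (h : ch ∈ pvKeep text ignore_chars) :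
    text.toList.foldl (fun n c => if c.toString == ch then n + 1 else n) (0 : Int)
    = ((pvKeep text ignore_chars).count ch : Int) := by
  rw [show List.foldl (fun n c => if c.toString == ch then n + 1 else n) (0 : Int) text.toList
        = List.foldl (fun n s => if s == ch then n + (1 : Int) else n) 0
            (text.toList.map Char.toString) from
          (List.foldl_map (f := Char.toString)
            (g := fun n s => if s == ch then n + (1 : Int) else n)
            (l := text.toList) (init := 0)).symm,
      PySem.List.foldl_beq_add_one, zero_add]
  obtain ⟨c, hc, rfl⟩ := List.mem_map.mp h
  have hinj : Function.Injective Char.toString := fun a b hab => by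
    simpa using congrArg String.toList hab
  rw [pvKeep]
  norm_cast
  rw [List.count_map_of_injective _ _ hinj, List.count_map_of_injective _ _ hinj]
  have hcf : (!PySem.Str.isIn c.toString ignore_chars) = true := (List.mem_filter.mp hc).2
  apply Eq.symm
  apply count_filter_of_pos
  exact hcf

theorem count_occurrences_advanced_spec_aux (text ignore_chars : String) (sort_count : Bool) :
    count_occurrences_advanced text ignore_chars sort_count
    = count_occurrences_advanced_alt text ignore_chars sort_count := by
  unfold count_occurrences_advanced count_occurrences_advanced_alt
  simp only [pv_dict_eq, pv_distinct_eq, PySem.Dict.items_counter]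
  have hmap : (PySem.Set.ofList (pvKeep text ignore_chars)).map
        (fun k => (k, ((pvKeep text ignore_chars).count k : Int)))
      = (PySem.Set.ofList (pvKeep text ignore_chars)).map (fun ch =>
        (ch, text.toList.foldl (fun n c => if c.toString == ch then n + 1 else n) (0 : Int))) := by
    apply List.map_congr_left
    intro ch hch
    rw [pv_count_eq text ignore_chars ch (by simpa using (PySem.Set.mem_ofList _ _).mp hch)]
  rw [hmap]

-- ===== VERDICT (by name: the statement is the Claim_ definition above) =====
theorem count_occurrences_advanced_spec : Claim_equal_count_occurrences_advanced := by
  intro text ignore_chars sort_count _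
  exact count_occurrences_advanced_spec_aux text ignore_chars sort_count
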